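-- pv_equiv track=rewrite | github.com/aletheiaprotocol-ai/aletheia-lora | src/aletheia_lora/config.py | _build_asymmetric_patterns
-- ===== SOURCE A (Python) =====
-- from typing import Dict, List, Optional, Tuple
--
-- ATTENTION_MODULES = {"q_proj", "k_proj", "v_proj", "o_proj"}
--
-- MLP_MODULES = {"gate_proj", "up_proj", "down_proj"}
--
-- def _build_asymmetric_patterns(
--     target_modules: List[str],
--     attention_r: Optional[int],
--     mlp_r: Optional[int],
--     attention_alpha: Optional[int],
--     mlp_alpha: Optional[int],
-- ) -> Tuple[Dict[str, int], Dict[str, int]]: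
--     """Build PEFT rank/alpha pattern dictionaries for module-level asymmetry."""
--     rank_pattern: Dict[str, int] = {}
--     alpha_pattern: Dict[str, int] = {}
--
--     for module in target_modules:
--         if module in ATTENTION_MODULES:
--             if attention_r is not None:
--                 rank_pattern[module] = attention_r
--             if attention_alpha is not None:
--                 alpha_pattern[module] = attention_alpha
--         elif module in MLP_MODULES:
--             if mlp_r is not None:
--                 rank_pattern[module] = mlp_r
--             if mlp_alpha is not None:
--                 alpha_pattern[module] = mlp_alpha
--
--     return rank_pattern, alpha_pattern
-- ===== SOURCE B (Python) =====
-- # B: per-pattern helper — filter eligible modules, dedup via dict.fromkeys, one comprehension;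
-- # called twice (rank, alpha) instead of A's single loop mutating two dicts.
-- ATTENTION_MODULES = {"q_proj", "k_proj", "v_proj", "o_proj"}
-- MLP_MODULES = {"gate_proj", "up_proj", "down_proj"}
--
--
-- def _pattern(target_modules, attention_value, mlp_value):
--     eligible = [
--         m for m in target_modules
--         if (attention_value is not None and m in ATTENTION_MODULES)
--         or (mlp_value is not None and m in MLP_MODULES)
--     ]
--     return {
--         m: (attention_value if m in ATTENTION_MODULES else mlp_value)
--         for m in dict.fromkeys(eligible)
--     }
--
--
-- def _build_asymmetric_patterns(
--     target_modules,
--     attention_r,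
--     mlp_r,
--     attention_alpha,
--     mlp_alpha,
-- ):
--     return (
--         _pattern(target_modules, attention_r, mlp_r),
--         _pattern(target_modules, attention_alpha, mlp_alpha),
--     )
-- ===== Notes on version B (the rewrite author's own statement) =====
-- stated objective: alternative
-- what changed: Replaces A's single loop that classifies each module and mutates two dicts with a shared per-pattern helper called twice: filter the eligible modules for that pattern, dedup first occurrences with dict.fromkeys, and build the dict in one comprehension.
import Mathlib
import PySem

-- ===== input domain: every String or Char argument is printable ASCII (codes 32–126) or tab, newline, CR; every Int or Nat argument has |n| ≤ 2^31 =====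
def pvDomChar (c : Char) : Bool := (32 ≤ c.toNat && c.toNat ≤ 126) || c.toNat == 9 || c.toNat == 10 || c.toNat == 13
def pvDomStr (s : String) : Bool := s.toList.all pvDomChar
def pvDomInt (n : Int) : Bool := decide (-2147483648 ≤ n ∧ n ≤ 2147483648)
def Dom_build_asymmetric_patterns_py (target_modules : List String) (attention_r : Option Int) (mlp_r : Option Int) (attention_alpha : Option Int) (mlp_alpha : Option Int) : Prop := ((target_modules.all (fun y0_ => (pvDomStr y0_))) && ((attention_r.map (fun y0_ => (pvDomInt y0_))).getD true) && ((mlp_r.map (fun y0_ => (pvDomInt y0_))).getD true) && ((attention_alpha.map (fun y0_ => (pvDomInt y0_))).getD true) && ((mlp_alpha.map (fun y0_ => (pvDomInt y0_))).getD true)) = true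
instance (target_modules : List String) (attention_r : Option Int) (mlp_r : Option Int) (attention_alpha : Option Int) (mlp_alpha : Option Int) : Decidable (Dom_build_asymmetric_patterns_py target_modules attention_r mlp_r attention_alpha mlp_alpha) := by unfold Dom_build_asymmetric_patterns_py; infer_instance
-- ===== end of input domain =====

-- ===== PORT A =====
-- B changes only the decomposition (shared per-pattern helper, filter + dedup + comprehension,
-- called twice) instead of A's single classifying loop over two dicts; same O(n) cost.
def pvAttn : PySem.Set String := PySem.Set.ofList ["q_proj", "k_proj", "v_proj", "o_proj"]
def pvMlp : PySem.Set String := PySem.Set.ofList ["gate_proj", "up_proj", "down_proj"]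

def build_asymmetric_patterns_py (target_modules : List String) (attention_r : Option Int) (mlp_r : Option Int) (attention_alpha : Option Int) (mlp_alpha : Option Int) : (List (String × Int)) × (List (String × Int)) :=
  let res := target_modules.foldl
    (fun (s : PySem.Dict String Int × PySem.Dict String Int) module =>
      if pvAttn.contains module then
        ((match attention_r with | some r => s.1.insert module r | none => s.1),
         (match attention_alpha with | some a => s.2.insert module a | none => s.2))
      else if pvMlp.contains module then
        ((match mlp_r with | some r => s.1.insert module r | none => s.1),
         (match mlp_alpha with | some a => s.2.insert module a | none => s.2))
      else s)
    (PySem.Dict.empty, PySem.Dict.empty)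
  (res.1.items, res.2.items)

-- ===== PORT B =====
-- the `.getD 0` ports "the comprehension value, which is never None for an eligible module"
def pv_pattern_alt (target_modules : List String) (attention_value mlp_value : Option Int) : List (String × Int) :=
  let eligible := target_modules.filter (fun m =>
    (attention_value.isSome && pvAttn.contains m) || (mlp_value.isSome && pvMlp.contains m))
  (PySem.List.dedup eligible).map
    (fun m => (m, (if pvAttn.contains m then attention_value else mlp_value).getD 0))

def build_asymmetric_patterns_py_alt (target_modules : List String) (attention_r : Option Int) (mlp_r : Option Int) (attention_alpha : Option Int) (mlp_alpha : Option Int) : (List (String × Int)) × (List (String × Int)) :=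
  (pv_pattern_alt target_modules attention_r mlp_r,
   pv_pattern_alt target_modules attention_alpha mlp_alpha)

-- ===== PRECONDITION & SPEC =====
def Spec_build_asymmetric_patterns_py (target_modules : List String) (attention_r : Option Int) (mlp_r : Option Int) (attention_alpha : Option Int) (mlp_alpha : Option Int) (out : (List (String × Int)) × (List (String × Int))) : Prop := out = build_asymmetric_patterns_py_alt target_modules attention_r mlp_r attention_alpha mlp_alpha
instance (target_modules : List String) (attention_r : Option Int) (mlp_r : Option Int) (attention_alpha : Option Int) (mlp_alpha : Option Int) (out : (List (String × Int)) × (List (String × Int))) : Decidable (Spec_build_asymmetric_patterns_py target_modules attention_r mlp_r attention_alpha mlp_alpha out) := by unfold Spec_build_asymmetric_patterns_py; infer_instance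

-- ===== CLAIM (what is proved, stated in full; the proofs are below) =====
def Claim_equal_build_asymmetric_patterns_py : Prop := ∀ (target_modules : List String) (attention_r : Option Int) (mlp_r : Option Int) (attention_alpha : Option Int) (mlp_alpha : Option Int), Dom_build_asymmetric_patterns_py target_modules attention_r mlp_r attention_alpha mlp_alpha → Spec_build_asymmetric_patterns_py target_modules attention_r mlp_r attention_alpha mlp_alpha (build_asymmetric_patterns_py target_modules attention_r mlp_r attention_alpha mlp_alpha)

-- ===== LEMMAS AND PROOFS =====
lemma pv_disj (m : String) (h : m ∈ pvAttn) : m ∉ pvMlp := by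
  simp [pvAttn, PySem.Set.mem_ofList] at h
  rcases h with h | h | h | h <;> subst h <;> decide

lemma pv_getD_foldl_insert_const (v : String → Int) :
    ∀ (l : List String) (d : PySem.Dict String Int) (k : String),
      (l.foldl (fun d x => d.insert x (v x)) d).getD k 0
        = if k ∈ l then v k else d.getD k 0 := by
  intro l
  induction l with
  | nil => intro d k; simp
  | cons x rest ih =>
    intro d k
    simp only [List.foldl_cons, ih, PySem.Dict.getD_insert, List.mem_cons]
    by_cases hk : k ∈ rest
    · simp [hk]
    · by_cases hx : k = x <;> simp [hk, hx]

lemma pv_foldl_condInsert_items (pred : String → Bool) (v : String → Int) (tm : List String) :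
    (tm.foldl (fun d m => if pred m then d.insert m (v m) else d) PySem.Dict.empty).items
      = (PySem.List.dedup (tm.filter pred)).map (fun k => (k, v k)) := by
  rw [PySem.List.foldl_if_eq_foldl_filter]
  have hnd : ((tm.filter pred).foldl (fun d m => d.insert m (v m)) PySem.Dict.empty).keys.Nodup :=
    PySem.Dict.nodup_keys_foldl_insert _ (fun _ m => v m) _ PySem.Dict.nodup_keys_empty
  rw [PySem.Dict.items_eq_map_keys _ hnd 0]
  have hkeys : ((tm.filter pred).foldl (fun d m => d.insert m (v m)) PySem.Dict.empty).keys
      = PySem.List.dedup (tm.filter pred) := by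
    rw [PySem.Dict.keys_foldl_insert]
    simp [PySem.Set.update, PySem.Set.ofList_eq_foldl, PySem.List.dedup_eq_ofList]
  rw [hkeys]
  apply List.map_congr_left
  intro k hk
  have hk' : k ∈ tm.filter pred := (PySem.List.mem_dedup _ _).mp hk
  simp [pv_getD_foldl_insert_const, hk']

lemma pv_pattern_eq (tm : List String) (av mv : Option Int) :
    (tm.foldl
      (fun (d : PySem.Dict String Int) m =>
        if pvAttn.contains m then
          (match av with | some r => d.insert m r | none => d)
        else if pvMlp.contains m then
          (match mv with | some r => d.insert m r | none => d)
        else d)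
      PySem.Dict.empty).items = pv_pattern_alt tm av mv := by
  have hstep : (fun (d : PySem.Dict String Int) m =>
        if pvAttn.contains m then
          (match av with | some r => d.insert m r | none => d)
        else if pvMlp.contains m then
          (match mv with | some r => d.insert m r | none => d)
        else d)
      = (fun (d : PySem.Dict String Int) m =>
          if (if pvAttn.contains m then av.isSome else (pvMlp.contains m && mv.isSome)) then
            d.insert m (if pvAttn.contains m then av.getD 0 else mv.getD 0)
          else d) := by
    funext d m
    by_cases h1 : m ∈ pvAttn <;> by_cases h2 : m ∈ pvMlp <;>
      cases av <;> cases mv <;> simp [PySem.Set.contains, h1, h2]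
  rw [hstep, pv_foldl_condInsert_items]
  unfold pv_pattern_alt
  have hfilter : tm.filter (fun m => if pvAttn.contains m then av.isSome else (pvMlp.contains m && mv.isSome))
      = tm.filter (fun m => (av.isSome && pvAttn.contains m) || (mv.isSome && pvMlp.contains m)) := by
    apply List.filter_congr
    intro m _
    by_cases h1 : m ∈ pvAttn
    · simp [PySem.Set.contains, h1, pv_disj m h1]
    · simp [PySem.Set.contains, h1, Bool.and_comm]
  have hval : (fun k => (k, if pvAttn.contains k then av.getD 0 else mv.getD 0))
      = (fun m => (m, (if pvAttn.contains m then av else mv).getD 0)) := by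
    funext k
    by_cases h1 : k ∈ pvAttn <;> simp [PySem.Set.contains, h1]
  rw [hfilter, hval]

lemma pv_split (tm : List String) (ar mr aa ma : Option Int) :
    tm.foldl
      (fun (s : PySem.Dict String Int × PySem.Dict String Int) module =>
        if pvAttn.contains module then
          ((match ar with | some r => s.1.insert module r | none => s.1),
           (match aa with | some a => s.2.insert module a | none => s.2))
        else if pvMlp.contains module then
          ((match mr with | some r => s.1.insert module r | none => s.1),
           (match ma with | some a => s.2.insert module a | none => s.2))
        else s)
      (PySem.Dict.empty, PySem.Dict.empty)
      = (tm.foldl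
          (fun (d : PySem.Dict String Int) m =>
            if pvAttn.contains m then (match ar with | some r => d.insert m r | none => d)
            else if pvMlp.contains m then (match mr with | some r => d.insert m r | none => d)
            else d) PySem.Dict.empty,
         tm.foldl
          (fun (d : PySem.Dict String Int) m =>
            if pvAttn.contains m then (match aa with | some a => d.insert m a | none => d)
            else if pvMlp.contains m then (match ma with | some a => d.insert m a | none => d)
            else d) PySem.Dict.empty) := by
  rw [← PySem.List.foldl_prod_mk]
  congr 1
  funext s module
  by_cases h1 : module ∈ pvAttn <;> by_cases h2 : module ∈ pvMlp <;>
    simp [PySem.Set.contains, h1, h2]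

-- ===== VERDICT (by name: the statement is the Claim_ definition above) =====
theorem build_asymmetric_patterns_py_spec : Claim_equal_build_asymmetric_patterns_py := by
  intro tm ar mr aa ma _
  unfold Spec_build_asymmetric_patterns_py build_asymmetric_patterns_py build_asymmetric_patterns_py_alt
  rw [pv_split]
  exact Prod.ext (pv_pattern_eq tm ar mr) (pv_pattern_eq tm aa ma)
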